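-- pv_equiv track=rewrite | github.com/kiiisy/pykins2_0 | jenkins_module/my_jenkins.py | _conversion_time
-- ===== SOURCE A (Python) =====
-- from typing import Tuple
--
-- def _conversion_time(weekday: Tuple[int], build_time: str) -> str:
--     build_time_split = build_time.split(":")
--     hour = build_time_split[0]
--     # 0分の場合はHのハッシュを使用する(Jenkins的にはHが推奨らしいので)
--     minute = 'H' if build_time_split[1] == "0" else build_time_split[1]
--     time = minute + ' ' + hour + ' '  + '*' + ' ' + '*' + ' '
--
--     active_days = []
--     start_day = None
--     end_day = None
--
--     for i, day in enumerate(weekday):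
--         if day == 1:
--             if start_day is None:
--                 start_day = i
--             end_day = i
--         elif start_day is not None:
--             if start_day == end_day:
--                 active_days.append(str(start_day))
--             else:
--                 active_days.append(f"{start_day}-{end_day}")
--             start_day = None
--             end_day = None
--
--     if start_day is not None:
--         if start_day == end_day:
--             active_days.append(str(start_day))
--         else:
--             active_days.append(f"{start_day}-{end_day}")
--
--     return time + ','.join(active_days)
-- ===== SOURCE B (Python) =====
-- # B: extract each maximal run of consecutive 1-days recursively (consume a whole
-- # run at a time) instead of A's per-element start/end flag state machine.
--
-- def _runs(days, i):
--     if not days: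
--         return []
--     if days[0] != 1:
--         return _runs(days[1:], i + 1)
--     j = i
--     rest = days
--     while rest and rest[0] == 1:
--         rest = rest[1:]
--         j += 1
--     # the run covers indices i .. j-1
--     label = str(i) if j - 1 == i else f"{i}-{j - 1}"
--     return [label] + _runs(rest, j)
--
--
-- def _conversion_time(weekday, build_time):
--     parts = build_time.split(":")
--     hour = parts[0]
--     minute = 'H' if parts[1] == "0" else parts[1]
--     time = minute + ' ' + hour + ' * * '
--     return time + ','.join(_runs(list(weekday), 0))
-- ===== Notes on version B (the rewrite author's own statement) =====
-- stated objective: alternative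
-- what changed: A scans day-by-day with start_day/end_day flag state and a trailing flush; B recursively extracts one maximal run of consecutive active days at a time (inner while consuming the run, recursion on the remainder).
import Mathlib
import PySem

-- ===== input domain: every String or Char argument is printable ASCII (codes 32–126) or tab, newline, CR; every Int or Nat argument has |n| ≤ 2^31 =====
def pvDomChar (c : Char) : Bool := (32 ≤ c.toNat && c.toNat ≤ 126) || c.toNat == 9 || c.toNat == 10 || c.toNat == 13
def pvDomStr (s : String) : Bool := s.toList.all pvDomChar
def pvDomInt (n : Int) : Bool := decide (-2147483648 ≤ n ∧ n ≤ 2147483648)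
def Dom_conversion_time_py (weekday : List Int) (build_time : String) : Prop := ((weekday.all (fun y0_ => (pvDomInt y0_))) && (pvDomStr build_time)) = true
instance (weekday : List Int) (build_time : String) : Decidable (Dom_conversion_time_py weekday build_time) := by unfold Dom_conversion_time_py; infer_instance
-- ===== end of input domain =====

-- B replaces A's per-element start/end flag state machine by a recursion that consumes
-- one maximal run of consecutive active days at a time (objective: alternative decomposition).


-- ===== PORT A =====
-- body of A's for-loop: state = (active_days, start_day, end_day), element = (i, day)
def pvStepA (st : List String × Option Int × Option Int) (p : Int × Int) :
    List String × Option Int × Option Int :=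
  if p.2 == 1 then
    (st.1, (match st.2.1 with | none => some p.1 | some s => some s), some p.1)
  else
    match st.2.1 with
    | some s =>
        (st.1 ++ [if (some s : Option Int) == st.2.2 then PySem.Int.toStr s
                  else PySem.Int.toStr s ++ "-" ++
                    (match st.2.2 with | some e => PySem.Int.toStr e | none => "None")],
         none, none)
    | none => st

-- A's trailing "if start_day is not None" flush after the loop
def pvFlushA (st : List String × Option Int × Option Int) : List String :=
  match st.2.1 with
  | some s =>
      st.1 ++ [if (some s : Option Int) == st.2.2 then PySem.Int.toStr s
               else PySem.Int.toStr s ++ "-" ++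
                 (match st.2.2 with | some e => PySem.Int.toStr e | none => "None")]
  | none => st.1

def conversion_time_py (weekday : List Int) (build_time : String) : String :=
  let bts := (PySem.Str.split? build_time ":").getD []   -- sep ":" ≠ "", so split? is always some
  let hour := PySem.List.pyGetD bts 0 ""                 -- bts[0] (in range under Pre_)
  let m := PySem.List.pyGetD bts 1 ""                    -- bts[1] (in range under Pre_)
  let minute := if m == "0" then "H" else m
  let time := minute ++ " " ++ hour ++ " " ++ "*" ++ " " ++ "*" ++ " "
  let st := (PySem.List.enumerate weekday 0).foldl pvStepA ([], none, none)
  time ++ PySem.Str.join "," (pvFlushA st)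

-- ===== PORT B =====
-- the while-loop of Source B's _runs: consume leading 1s, return (next index, rest)
def pvEat : List Int → Int → Int × List Int
  | [], j => (j, [])
  | d :: ds, j => if d == 1 then pvEat ds (j + 1) else (j, d :: ds)

theorem pvEat_len : ∀ (ds : List Int) (j : Int), (pvEat ds j).2.length ≤ ds.length := by
  intro ds
  induction ds with
  | nil => intro j; simp [pvEat]
  | cons d ds ih =>
      intro j
      by_cases h : d = 1
      · simpa [pvEat, h] using Nat.le_succ_of_le (ih (j + 1))
      · simp [pvEat, h]

-- Source B's _runs
def pvRuns : List Int → Int → List String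
  | [], _ => []
  | d :: ds, i =>
    if d != 1 then pvRuns ds (i + 1)
    else
      let p := pvEat (d :: ds) i
      (if p.1 - 1 == i then PySem.Int.toStr i
       else PySem.Int.toStr i ++ "-" ++ PySem.Int.toStr (p.1 - 1)) :: pvRuns p.2 p.1
termination_by ds _ => ds.length
decreasing_by
  · simp
  · simp at *
    have h1 : d = 1 := by omega
    have := pvEat_len ds (i + 1)
    simp [pvEat, h1]
    omega

def conversion_time_py_alt (weekday : List Int) (build_time : String) : String :=
  let parts := (PySem.Str.split? build_time ":").getD []
  let hour := PySem.List.pyGetD parts 0 ""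
  let minute := if PySem.List.pyGetD parts 1 "" == "0" then "H"
                else PySem.List.pyGetD parts 1 ""
  let time := minute ++ " " ++ hour ++ " * * "
  time ++ PySem.Str.join "," (pvRuns weekday 0)

-- ===== PRECONDITION & SPEC =====
-- Pre_ excludes exactly the build_time strings without ":" , on which Python A raises IndexError
-- (build_time.split(":")[1]); B raises there too.
def Pre_conversion_time_py (weekday : List Int) (build_time : String) : Prop :=
  2 ≤ ((PySem.Str.split? build_time ":").getD []).length
instance (weekday : List Int) (build_time : String) : Decidable (Pre_conversion_time_py weekday build_time) := by unfold Pre_conversion_time_py; infer_instance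
def pvWitness_conversion_time_py : List Int × String := ([1, 1, 0, 1], "3:0")

def Spec_conversion_time_py (weekday : List Int) (build_time : String) (out : String) : Prop := out = conversion_time_py_alt weekday build_time
instance (weekday : List Int) (build_time : String) (out : String) : Decidable (Spec_conversion_time_py weekday build_time out) := by unfold Spec_conversion_time_py; infer_instance

-- ===== CLAIM (what is proved, stated in full; the proofs are below) =====
def Claim_equal_conversion_time_py : Prop := ∀ (weekday : List Int) (build_time : String), Dom_conversion_time_py weekday build_time → Pre_conversion_time_py weekday build_time → Spec_conversion_time_py weekday build_time (conversion_time_py weekday build_time)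

-- ===== LEMMAS AND PROOFS =====

-- the eat phase stops on [] or a non-1 head
theorem pvEat_head (ds : List Int) (j : Int) :
    (pvEat ds j).2 = [] ∨ ∃ d rest, (pvEat ds j).2 = d :: rest ∧ d ≠ 1 := by
  induction ds generalizing j with
  | nil => left; simp [pvEat]
  | cons d ds ih =>
      by_cases h : d = 1
      · simpa [pvEat, h] using ih (j + 1)
      · right; exact ⟨d, ds, by simp [pvEat, h], h⟩

theorem pvEat_cons_one (ds : List Int) (j : Int) :
    pvEat (1 :: ds) j = pvEat ds (j + 1) := by simp [pvEat]

-- while A's state carries an open run (start s, end = off - 1), the loop just advances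
-- over leading 1s exactly like pvEat
theorem eatA (ds : List Int) (off s : Int) (acc : List String) :
    (PySem.List.enumerate ds off).foldl pvStepA (acc, some s, some (off - 1))
      = (PySem.List.enumerate (pvEat ds off).2 (pvEat ds off).1).foldl pvStepA
          (acc, some s, some ((pvEat ds off).1 - 1)) := by
  induction ds generalizing off with
  | nil => simp [pvEat]
  | cons d ds ih =>
      by_cases h : d = 1
      · have : (off + 1) - 1 = off := by ring
        simpa [pvEat, h, PySem.List.enumerate_cons, pvStepA, this] using ih (off + 1)
      · simp [pvEat, h]

-- the two run-formatting expressions agree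
theorem fmt_eq (s e : Int) :
    (if (some s : Option Int) == (some e : Option Int) then PySem.Int.toStr s
     else PySem.Int.toStr s ++ "-" ++
       (match (some e : Option Int) with | some e => PySem.Int.toStr e | none => "None"))
    = (if e == s then PySem.Int.toStr s
       else PySem.Int.toStr s ++ "-" ++ PySem.Int.toStr e) := by
  by_cases h : s = e
  · simp [h]
  · simp [h, Ne.symm h]

-- main loop invariant: from a closed state, A's loop + final flush produce acc ++ pvRuns ds off
theorem loopA (n : Nat) : ∀ (ds : List Int), ds.length ≤ n → ∀ (off : Int) (acc : List String),
    pvFlushA ((PySem.List.enumerate ds off).foldl pvStepA (acc, none, none))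
      = acc ++ pvRuns ds off := by
  induction n with
  | zero =>
      intro ds hds off acc
      have : ds = [] := List.eq_nil_of_length_eq_zero (Nat.le_zero.mp hds)
      simp [this, pvFlushA, pvRuns]
  | succ m ih =>
      intro ds hds off acc
      match ds with
      | [] => simp [pvFlushA, pvRuns]
      | d :: ds =>
        have hlen : ds.length ≤ m := by simpa using hds
        by_cases h : d = 1
        · -- enter a run starting at off
          have hstep : pvStepA (acc, none, none) (off, d) = (acc, some off, some off) := by
            simp [pvStepA, h]
          have hoff : some off = some ((off + 1) - 1) := by norm_num
          rw [PySem.List.enumerate_cons, List.foldl_cons, hstep]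
          rw [show ((acc, some off, some off) : List String × Option Int × Option Int)
                = (acc, some off, some ((off + 1) - 1)) by norm_num]
          rw [eatA ds (off + 1) off acc]
          rcases pvEat_head ds (off + 1) with hrest | ⟨d', rest', hrest, hd'⟩
          · -- the run reaches the end of the list
            rw [hrest]
            simp only [PySem.List.enumerate_nil, List.foldl_nil]
            rw [show pvRuns (d :: ds) off
                  = (if (pvEat (d :: ds) off).1 - 1 == off then PySem.Int.toStr off
                     else PySem.Int.toStr off ++ "-" ++ PySem.Int.toStr ((pvEat (d :: ds) off).1 - 1))
                      :: pvRuns (pvEat (d :: ds) off).2 (pvEat (d :: ds) off).1 by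
                  rw [pvRuns]; simp [h]]
            rw [h, pvEat_cons_one, hrest]
            simp only [pvFlushA, pvRuns]
            rw [fmt_eq]
          · -- the run ends at a non-1 day d'
            rw [hrest, PySem.List.enumerate_cons, List.foldl_cons]
            have hstep2 : pvStepA (acc, some off, some ((pvEat ds (off + 1)).1 - 1))
                ((pvEat ds (off + 1)).1, d')
                = (acc ++ [if (some off : Option Int) == (some ((pvEat ds (off + 1)).1 - 1) : Option Int)
                            then PySem.Int.toStr off
                            else PySem.Int.toStr off ++ "-" ++ PySem.Int.toStr ((pvEat ds (off + 1)).1 - 1)],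
                   none, none) := by
              simp [pvStepA, hd']
            rw [hstep2]
            have hrlen : rest'.length ≤ m := by
              have h1 := pvEat_len ds (off + 1)
              rw [hrest] at h1
              simp at h1
              omega
            rw [ih rest' hrlen ((pvEat ds (off + 1)).1 + 1) _]
            rw [show pvRuns (d :: ds) off
                  = (if (pvEat (d :: ds) off).1 - 1 == off then PySem.Int.toStr off
                     else PySem.Int.toStr off ++ "-" ++ PySem.Int.toStr ((pvEat (d :: ds) off).1 - 1))
                      :: pvRuns (pvEat (d :: ds) off).2 (pvEat (d :: ds) off).1 by
                  rw [pvRuns]; simp [h]]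
            rw [h, pvEat_cons_one, hrest]
            rw [show pvRuns (d' :: rest') (pvEat ds (off + 1)).1
                  = pvRuns rest' ((pvEat ds (off + 1)).1 + 1) by rw [pvRuns]; simp [hd']]
            rw [← fmt_eq]
            simp
        · -- closed state over a non-1 day: nothing happens
          have hstep : pvStepA (acc, none, none) (off, d) = (acc, none, none) := by
            simp [pvStepA, h]
          rw [PySem.List.enumerate_cons, List.foldl_cons, hstep, ih ds hlen (off + 1) acc]
          rw [show pvRuns (d :: ds) off = pvRuns ds (off + 1) by rw [pvRuns]; simp [h]]

-- ===== VERDICT (by name: the statement is the Claim_ definition above) =====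
theorem conversion_time_py_spec : Claim_equal_conversion_time_py := by
  intro weekday build_time _ _
  unfold Spec_conversion_time_py conversion_time_py conversion_time_py_alt
  dsimp only
  rw [loopA weekday.length weekday (le_refl _) 0 []]
  simp [String.append_assoc]
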